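-- pv_equiv track=rewrite | github.com/BeskarDev/nexus-rpg | src/utils/scripts/notion-import/import_notion.py | _replace_sections_with_links
-- ===== SOURCE A (Python) =====
-- from typing import Dict, List, Tuple, Optional
--
-- def _replace_sections_with_links(markdown: str, replace_sections: List[Dict]) -> str:
--     """Replace sections with reference links without creating files."""
--     lines = markdown.split('\n')
--
--     for section_config in replace_sections:
--         start_marker = section_config.get('start_marker', '')
--         end_marker = section_config.get('end_marker', '')
--         replacement = section_config.get('replacement', '')
--
--         # Find the section boundaries
--         start_idx = None
--         end_idx = None
--
--         for i, line in enumerate(lines):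
--             if start_marker and line.strip() == start_marker.strip():
--                 start_idx = i
--             if end_marker and line.strip().startswith(end_marker.strip()):
--                 end_idx = i
--                 break
--
--         if start_idx is None:
--             continue
--
--         # If no end marker found, skip this section
--         if end_idx is None:
--             end_idx = len(lines)
--
--         # Replace the section with just the heading and reference link
--         lines[start_idx] = f"{start_marker}\n\n{replacement}"
--         # Remove the content lines
--         del lines[start_idx + 1:end_idx]
--
--     return '\n'.join(lines)
-- ===== SOURCE B (Python) =====
-- from typing import Dict, List
--
--
-- def _replace_sections_with_links(markdown: str, replace_sections: List[Dict]) -> str: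
--     """Replace sections with reference links without creating files."""
--     lines = markdown.split('\n')
--
--     for section_config in replace_sections:
--         start_marker = section_config.get('start_marker', '')
--         end_marker = section_config.get('end_marker', '')
--         replacement = section_config.get('replacement', '')
--
--         # Pass 1: first line starting with the end marker (default: end of document).
--         if end_marker:
--             end_idx = next((i for i, line in enumerate(lines)
--                             if line.strip().startswith(end_marker.strip())),
--                            len(lines))
--         else:
--             end_idx = len(lines)
--
--         # Pass 2: last matching start line at or before the end line.
--         start_idx = None
--         if start_marker:
--             target = start_marker.strip()
--             for i in range(min(end_idx + 1, len(lines)) - 1, -1, -1):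
--                 if lines[i].strip() == target:
--                     start_idx = i
--                     break
--         if start_idx is None:
--             continue
--
--         # Rebuild by slicing: keep the head, one combined heading+link line, and
--         # the tail from the end marker on (never re-including the start line).
--         lines = (lines[:start_idx]
--                  + [f"{start_marker}\n\n{replacement}"]
--                  + lines[max(start_idx + 1, end_idx):])
--
--     return '\n'.join(lines)
-- ===== Notes on version B (the rewrite author's own statement) =====
-- stated objective: alternative
-- what changed: Replaces A's single stateful scan (tracking both markers with a break) and in-place del/index-assignment by two dedicated passes - a forward search for the first end-marker line, then a backward search for the last start-marker line before it - and a pure slice-based reconstruction of the list.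
import Mathlib
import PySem

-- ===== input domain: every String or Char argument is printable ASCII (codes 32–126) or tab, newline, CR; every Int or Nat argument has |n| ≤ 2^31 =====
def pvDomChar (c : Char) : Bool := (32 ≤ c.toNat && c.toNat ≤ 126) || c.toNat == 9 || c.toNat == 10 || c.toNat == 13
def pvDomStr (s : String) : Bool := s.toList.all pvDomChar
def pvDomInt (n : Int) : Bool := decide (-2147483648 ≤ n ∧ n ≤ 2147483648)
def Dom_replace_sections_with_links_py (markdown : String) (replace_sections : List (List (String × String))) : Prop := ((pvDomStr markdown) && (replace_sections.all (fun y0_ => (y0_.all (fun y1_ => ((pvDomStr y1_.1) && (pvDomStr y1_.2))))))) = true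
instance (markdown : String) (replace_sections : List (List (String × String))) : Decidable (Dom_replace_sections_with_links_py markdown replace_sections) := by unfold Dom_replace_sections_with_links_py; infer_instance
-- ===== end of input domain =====

-- B rewrites A's single stateful marker scan as two dedicated passes (first end-marker
-- line forward, last start-marker line backward) with a pure slice-based rebuild;
-- objective: alternative decomposition, same cost.

-- cfg.get(key, '') on the section dict (shared dict-lookup primitive)
def pvCfgGet (cfg : List (String × String)) (k : String) : String :=
  (PySem.Dict.mk cfg).getD k ""

-- ===== PORT A =====
-- the 'for i, line in enumerate(lines)' loop: accumulates start_idx, breaks at end marker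
def pvAScan (sM eM : String) (lines : List String) (i : Nat) (acc : Option Nat) :
    Option Nat × Option Nat :=
  match lines with
  | [] => (acc, none)
  | l :: rest =>
    let acc' := if sM ≠ "" ∧ PySem.Str.strip l = PySem.Str.strip sM then some i else acc
    if eM ≠ "" ∧ PySem.Str.startswith (PySem.Str.strip l) (PySem.Str.strip eM) then
      (acc', some i)
    else
      pvAScan sM eM rest (i + 1) acc'

-- one iteration of the outer 'for section_config in replace_sections' loop
def pvAStep (lines : List String) (cfg : List (String × String)) : List String :=
  let sM := pvCfgGet cfg "start_marker"
  let eM := pvCfgGet cfg "end_marker"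
  let repl := pvCfgGet cfg "replacement"
  match pvAScan sM eM lines 0 none with
  | (none, _) => lines
  | (some s, eOpt) =>
    let e := eOpt.getD lines.length
    let lines' := lines.set s (sM ++ "\n\n" ++ repl)
    -- del lines[s+1:e]: exact for these Nat indices (empty deletion when e ≤ s+1)
    lines'.take (s + 1) ++ lines'.drop (max (s + 1) e)

def replace_sections_with_links_py (markdown : String) (replace_sections : List (List (String × String))) : String :=
  -- markdown.split('\n'): split? is some since the separator "\n" is non-empty
  PySem.Str.join "\n" (replace_sections.foldl pvAStep ((PySem.Str.split? markdown "\n").getD []))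

-- ===== PORT B =====
-- pass 1: first index whose stripped line starts with the stripped end marker
def pvFindEnd (eM : String) (lines : List String) (i : Nat) : Option Nat :=
  match lines with
  | [] => none
  | l :: rest =>
    if PySem.Str.startswith (PySem.Str.strip l) (PySem.Str.strip eM) then some i
    else pvFindEnd eM rest (i + 1)

-- pass 2: 'for i in range(k-1, -1, -1)' backward search for the last start-marker line
def pvFindLastEq (t : String) (lines : List String) : Nat → Option Nat
  | 0 => none
  | n + 1 =>
    if PySem.Str.strip (lines.getD n "") = t then some n
    else pvFindLastEq t lines n

def pvBStep (lines : List String) (cfg : List (String × String)) : List String :=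
  let sM := pvCfgGet cfg "start_marker"
  let eM := pvCfgGet cfg "end_marker"
  let repl := pvCfgGet cfg "replacement"
  let e := if eM ≠ "" then (pvFindEnd eM lines 0).getD lines.length else lines.length
  let sOpt := if sM ≠ "" then pvFindLastEq (PySem.Str.strip sM) lines (min (e + 1) lines.length)
              else none
  match sOpt with
  | none => lines
  | some s => lines.take s ++ [sM ++ "\n\n" ++ repl] ++ lines.drop (max (s + 1) e)

def replace_sections_with_links_py_alt (markdown : String) (replace_sections : List (List (String × String))) : String :=
  PySem.Str.join "\n" (replace_sections.foldl pvBStep ((PySem.Str.split? markdown "\n").getD []))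

-- ===== PRECONDITION & SPEC =====
def Spec_replace_sections_with_links_py (markdown : String) (replace_sections : List (List (String × String))) (out : String) : Prop := out = replace_sections_with_links_py_alt markdown replace_sections
instance (markdown : String) (replace_sections : List (List (String × String))) (out : String) : Decidable (Spec_replace_sections_with_links_py markdown replace_sections out) := by unfold Spec_replace_sections_with_links_py; infer_instance

-- ===== CLAIM (what is proved, stated in full; the proofs are below) =====
def Claim_equal_replace_sections_with_links_py : Prop := ∀ (markdown : String) (replace_sections : List (List (String × String))), Dom_replace_sections_with_links_py markdown replace_sections → Spec_replace_sections_with_links_py markdown replace_sections (replace_sections_with_links_py markdown replace_sections)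

-- ===== LEMMAS AND PROOFS =====

-- spec function: the last index j (offset i) in lines whose stripped line equals strip sM
def pvLastP (sM : String) (lines : List String) (i : Nat) (acc : Option Nat) : Option Nat :=
  match lines with
  | [] => acc
  | l :: rest =>
    pvLastP sM rest (i + 1)
      (if sM ≠ "" ∧ PySem.Str.strip l = PySem.Str.strip sM then some i else acc)

theorem pvFindEnd_ge (eM : String) (lines : List String) (i j : Nat)
    (h : pvFindEnd eM lines i = some j) : i ≤ j := by
  induction lines generalizing i with
  | nil => simp [pvFindEnd] at h
  | cons l rest ih =>
    simp only [pvFindEnd] at h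
    split at h
    · have := Option.some.inj h
      omega
    · exact Nat.le_of_succ_le (ih (i + 1) h)

theorem pvFindEnd_lt (eM : String) (lines : List String) (i j : Nat)
    (h : pvFindEnd eM lines i = some j) : j < i + lines.length := by
  induction lines generalizing i with
  | nil => simp [pvFindEnd] at h
  | cons l rest ih =>
    simp only [pvFindEnd] at h
    split at h
    · have := Option.some.inj h
      simp only [List.length_cons]
      omega
    · have := ih (i + 1) h
      simp only [List.length_cons]
      omega

theorem pvAScan_characterize (sM eM : String) (lines : List String) : ∀ (i : Nat) (acc : Option Nat),
    pvAScan sM eM lines i acc =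
      match (if eM ≠ "" then pvFindEnd eM lines i else none) with
      | none => (pvLastP sM lines i acc, none)
      | some j => (pvLastP sM (lines.take (j - i + 1)) i acc, some j) := by
  induction lines with
  | nil => intro i acc; by_cases h : eM = "" <;> simp [pvAScan, pvFindEnd, pvLastP, h]
  | cons l rest ih =>
    intro i acc
    simp only [pvAScan]
    by_cases hq : (eM ≠ "" ∧ PySem.Str.startswith (PySem.Str.strip l) (PySem.Str.strip eM) = true)
    · rw [if_pos hq, if_pos hq.1]
      simp only [pvFindEnd]
      rw [if_pos hq.2]
      show (if sM ≠ "" ∧ PySem.Str.strip l = PySem.Str.strip sM then some i else acc, some i)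
          = (pvLastP sM (List.take (i - i + 1) (l :: rest)) i acc, some i)
      have h1 : i - i + 1 = 1 := by omega
      rw [h1]
      simp only [List.take_succ_cons, List.take_zero, pvLastP]
    · rw [if_neg hq, ih]
      by_cases he : eM = ""
      · subst he
        have h1 : ¬ (("" : String) ≠ "") := fun h => h rfl
        rw [if_neg h1, if_neg h1]
        simp only [pvLastP]
      · have hq2 : ¬ (PySem.Str.startswith (PySem.Str.strip l) (PySem.Str.strip eM) = true) :=
          fun hst => hq ⟨he, hst⟩
        rw [if_pos he, if_pos he]
        simp only [pvFindEnd]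
        rw [if_neg hq2]
        rcases hfe : pvFindEnd eM rest (i + 1) with _ | j
        · simp only [pvLastP]
        · have hij : i + 1 ≤ j := pvFindEnd_ge eM rest (i + 1) j hfe
          have hshow : j - i + 1 = (j - (i + 1) + 1) + 1 := by omega
          show (pvLastP sM (List.take (j - (i + 1) + 1) rest) (i + 1)
                  (if sM ≠ "" ∧ PySem.Str.strip l = PySem.Str.strip sM then some i else acc), some j)
              = (pvLastP sM (List.take (j - i + 1) (l :: rest)) i acc, some j)
          rw [hshow]
          simp only [List.take_succ_cons, pvLastP]

theorem pvLastP_some_lt (sM : String) (lines : List String) : ∀ (i s : Nat) (acc : Option Nat),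
    pvLastP sM lines i acc = some s → acc = some s ∨ s < i + lines.length := by
  induction lines with
  | nil => intro i s acc h; simp [pvLastP] at h; exact Or.inl h
  | cons l rest ih =>
    intro i s acc h
    simp only [pvLastP] at h
    rcases ih (i + 1) s _ h with h' | h'
    · split at h'
      · simp at h'; right; simp; omega
      · left; exact h'
    · right; simp; omega

theorem pvLastP_append_singleton (sM : String) (xs : List String) (x : String) :
    ∀ (i : Nat) (acc : Option Nat),
    pvLastP sM (xs ++ [x]) i acc =
      if sM ≠ "" ∧ PySem.Str.strip x = PySem.Str.strip sM then some (i + xs.length)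
      else pvLastP sM xs i acc := by
  induction xs with
  | nil => intro i acc; simp [pvLastP]
  | cons y ys ih =>
    intro i acc
    simp only [List.cons_append, pvLastP, ih]
    have : i + 1 + ys.length = i + (ys.length + 1) := by omega
    simp [this]

theorem pvFindLastEq_eq_lastP (sM : String) (hs : sM ≠ "") (lines : List String) :
    ∀ (k : Nat), k ≤ lines.length →
    pvFindLastEq (PySem.Str.strip sM) lines k = pvLastP sM (lines.take k) 0 none := by
  intro k
  induction k with
  | zero => intro _; simp [pvFindLastEq, pvLastP]
  | succ n ih =>
    intro hk
    have hn : n < lines.length := by omega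
    have htake : lines.take (n + 1) = lines.take n ++ [lines[n]] :=
      List.take_succ_eq_append_getElem hn
    have hget : lines.getD n "" = lines[n] := List.getD_eq_getElem lines "" hn
    have hlen : (lines.take n).length = n := by simp; omega
    rw [htake, pvLastP_append_singleton]
    simp only [pvFindLastEq, hget, hlen, hs, ne_eq, not_false_eq_true, true_and, Nat.zero_add]
    split
    · rfl
    · exact ih (by omega)

theorem pvLastP_of_empty (lines : List String) : ∀ (i : Nat) (acc : Option Nat),
    pvLastP "" lines i acc = acc := by
  induction lines with
  | nil => intro i acc; rfl
  | cons l rest ih => intro i acc; simp [pvLastP, ih]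

theorem pvReconstruct (lines : List String) (s m : Nat) (new : String)
    (hs : s < lines.length) (hm : s + 1 ≤ m) :
    (lines.set s new).take (s + 1) ++ (lines.set s new).drop m =
      lines.take s ++ [new] ++ lines.drop m := by
  have hset : lines.set s new = lines.take s ++ new :: lines.drop (s + 1) := by
    rw [List.set_eq_take_append_cons_drop, if_pos hs]
  have hlen : (lines.take s).length = s := by simp; omega
  have hA : (lines.take s ++ [new] : List String).length = s + 1 := by simp [hlen]
  have hcons : lines.take s ++ new :: lines.drop (s + 1)
      = (lines.take s ++ [new]) ++ lines.drop (s + 1) := by simp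
  rw [hset, hcons,
    List.take_append_of_le_length (by omega : s + 1 ≤ (lines.take s ++ [new]).length),
    List.take_of_length_le (by omega),
    List.drop_append, List.drop_eq_nil_of_le (by omega), List.nil_append, List.drop_drop, hA,
    show s + 1 + (m - (s + 1)) = m by omega]

theorem pvStep_eq (lines : List String) (cfg : List (String × String)) :
    pvAStep lines cfg = pvBStep lines cfg := by
  unfold pvAStep pvBStep
  dsimp only
  set sM := pvCfgGet cfg "start_marker" with hsM
  set eM := pvCfgGet cfg "end_marker" with heM
  set repl := pvCfgGet cfg "replacement" with hrepl
  rw [pvAScan_characterize]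
  by_cases he : eM = ""
  · -- no end-marker search: e = len(lines)
    have hcond : ¬ (eM ≠ "") := by simp [he]
    simp only [if_neg hcond]
    by_cases hsm : sM = ""
    · have h2 : ¬ (sM ≠ "") := by simp [hsm]
      simp only [if_neg h2]
      rw [hsm, pvLastP_of_empty]
    · simp only [if_pos (show sM ≠ "" from hsm)]
      rw [show min (lines.length + 1) lines.length = lines.length by omega,
        pvFindLastEq_eq_lastP sM hsm lines lines.length (le_refl _), List.take_length]
      cases hlp : pvLastP sM lines 0 none with
      | none => rfl
      | some s =>
        have hslt : s < lines.length := by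
          rcases pvLastP_some_lt sM lines 0 s none hlp with h | h
          · exact absurd h (by simp)
          · simpa using h
        exact pvReconstruct lines s (max (s + 1) lines.length) _ hslt (by omega)
  · have he' : eM ≠ "" := he
    simp only [if_pos he']
    cases hfe : pvFindEnd eM lines 0 with
    | none =>
      -- end marker never found: fall back to len(lines)
      by_cases hsm : sM = ""
      · have h2 : ¬ (sM ≠ "") := by simp [hsm]
        simp only [if_neg h2]
        rw [hsm, pvLastP_of_empty]
      · simp only [if_pos (show sM ≠ "" from hsm), Option.getD_none]
        rw [show min (lines.length + 1) lines.length = lines.length by omega,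
          pvFindLastEq_eq_lastP sM hsm lines lines.length (le_refl _), List.take_length]
        cases hlp : pvLastP sM lines 0 none with
        | none => rfl
        | some s =>
          have hslt : s < lines.length := by
            rcases pvLastP_some_lt sM lines 0 s none hlp with h | h
            · exact absurd h (by simp)
            · simpa using h
          exact pvReconstruct lines s (max (s + 1) lines.length) _ hslt (by omega)
    | some j =>
      have hjlt : j < lines.length := by simpa using pvFindEnd_lt eM lines 0 j hfe
      by_cases hsm : sM = ""
      · have h2 : ¬ (sM ≠ "") := by simp [hsm]
        simp only [if_neg h2]
        rw [hsm, pvLastP_of_empty]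
      · simp only [if_pos (show sM ≠ "" from hsm), Option.getD_some, Nat.sub_zero]
        rw [show min (j + 1) lines.length = j + 1 by omega,
          pvFindLastEq_eq_lastP sM hsm lines (j + 1) (by omega)]
        cases hlp : pvLastP sM (lines.take (j + 1)) 0 none with
        | none => rfl
        | some s =>
          have hslt : s < lines.length := by
            rcases pvLastP_some_lt sM (lines.take (j + 1)) 0 s none hlp with h | h
            · exact absurd h (by simp)
            · have hle : (lines.take (j + 1)).length ≤ lines.length := by simp
              omega
          exact pvReconstruct lines s (max (s + 1) j) _ hslt (by omega)

-- ===== VERDICT (by name: the statement is the Claim_ definition above) =====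
theorem replace_sections_with_links_py_spec : Claim_equal_replace_sections_with_links_py := by
  intro markdown replace_sections _
  unfold Spec_replace_sections_with_links_py replace_sections_with_links_py
    replace_sections_with_links_py_alt
  congr 1
  exact List.foldl_ext _ _ _ (fun lines cfg _ => pvStep_eq lines cfg)
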